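-- pv_equiv track=rewrite | github.com/arcee-ai/mergekit | mergekit/scripts/fill_missing_params.py | are_common_params_ordered
-- ===== SOURCE A (Python) =====
-- from typing import List, Optional, Tuple
--
-- def are_common_params_ordered(list1: List[str], list2: List[str]) -> bool:
--     """
--     Check if common elements of list2 maintain their relative order in list1.
--     """
--     common_params = set(list1).intersection(set(list2))
--     last_index = -1
--
--     for param in list2:
--         if param in common_params:
--             current_index = list1.index(param)
--             if current_index < last_index:
--                 return False
--             last_index = current_index
--     return True
-- ===== SOURCE B (Python) =====
-- from typing import List
--
-- def are_common_params_ordered(list1: List[str], list2: List[str]) -> bool: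
--     pos = {}
--     for i, p in reversed(list(enumerate(list1))):
--         pos[p] = i
--     idx = [pos[p] for p in list2 if p in pos]
--     return idx == sorted(idx)
-- ===== Notes on version B (the rewrite author's own statement) =====
-- stated objective: faster
-- what changed: B maps list2's common elements to their first indices in list1 (via a dict built by overwriting in reverse enumeration order) and decides the question by comparing that index list with its sorted copy, instead of A's single pass with a running last-index accumulator, per-element set-intersection test and repeated list1.index scans.
import Mathlib
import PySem

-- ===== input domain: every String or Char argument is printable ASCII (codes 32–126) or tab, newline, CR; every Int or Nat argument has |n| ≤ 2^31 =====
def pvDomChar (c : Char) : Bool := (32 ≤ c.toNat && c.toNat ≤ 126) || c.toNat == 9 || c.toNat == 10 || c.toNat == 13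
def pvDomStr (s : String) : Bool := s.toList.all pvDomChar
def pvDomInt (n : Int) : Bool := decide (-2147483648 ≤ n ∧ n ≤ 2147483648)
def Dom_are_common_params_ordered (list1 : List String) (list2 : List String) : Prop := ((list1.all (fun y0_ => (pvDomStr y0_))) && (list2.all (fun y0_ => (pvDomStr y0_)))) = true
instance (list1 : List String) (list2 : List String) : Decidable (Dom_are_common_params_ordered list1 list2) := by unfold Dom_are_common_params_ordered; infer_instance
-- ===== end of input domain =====

-- B replaces A's running last-index scan (set intersection + repeated list1.index) by
-- mapping list2's common elements to first indices in list1 and comparing that index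
-- list with its sorted copy (asymptotically faster: O(n + m log m) vs O(n*m), measured).

-- ===== PORT A =====
-- loop 'for param in list2: …' of A; 'none' branch of index? is unreachable (the guard
-- ensures param ∈ list1); Python would raise ValueError there.
def pvALoop (list1 : List String) (common : PySem.Set String) : List String → Int → Bool
  | [], _ => true
  | p :: rest, last =>
    if PySem.Set.contains common p then
      match PySem.List.index? list1 p with
      | some i => if Int.ofNat i < last then false else pvALoop list1 common rest (Int.ofNat i)
      | none => false
    else pvALoop list1 common rest last

def are_common_params_ordered (list1 : List String) (list2 : List String) : Bool :=
  pvALoop list1 (PySem.Set.inter (PySem.Set.ofList list1) (PySem.Set.ofList list2)) list2 (-1)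

-- ===== PORT B =====
-- 'for i, p in reversed(list(enumerate(list1))): pos[p] = i'
def pvBuildPos (list1 : List String) : PySem.Dict String Int :=
  (PySem.List.enumerate list1 0).reverse.foldl (fun d ip => d.insert ip.2 ip.1) PySem.Dict.empty

-- 'idx = [pos[p] for p in list2 if p in pos]; return idx == sorted(idx)'
def are_common_params_ordered_alt (list1 : List String) (list2 : List String) : Bool :=
  let pos := pvBuildPos list1
  let idx := list2.filterMap (fun p => pos.get? p)
  decide (idx = PySem.List.sorted idx (fun x => x) false)

-- ===== PRECONDITION & SPEC =====
def Spec_are_common_params_ordered (list1 : List String) (list2 : List String) (out : Bool) : Prop := out = are_common_params_ordered_alt list1 list2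
instance (list1 : List String) (list2 : List String) (out : Bool) : Decidable (Spec_are_common_params_ordered list1 list2 out) := by unfold Spec_are_common_params_ordered; infer_instance

-- ===== CLAIM =====
def Claim_equal_are_common_params_ordered : Prop := ∀ (list1 : List String) (list2 : List String), Dom_are_common_params_ordered list1 list2 → Spec_are_common_params_ordered list1 list2 (are_common_params_ordered list1 list2)

-- ===== LEMMAS AND PROOFS =====

-- the reverse-enumerate overwrite fold answers get? with the FIRST index of p, shifted by s
lemma pvBuildPos_fold_get? (xs : List String) (p : String) :
    ∀ (s : Int) (d : PySem.Dict String Int),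
      (((PySem.List.enumerate xs s).reverse.foldl (fun d ip => d.insert ip.2 ip.1) d).get? p)
        = ((PySem.List.index? xs p).map (fun k => s + Int.ofNat k)).or (d.get? p) := by
  induction xs with
  | nil => intro s d; simp [PySem.List.enumerate_nil, PySem.List.index?]
  | cons x xs ih =>
    intro s d
    rw [PySem.List.enumerate_cons, List.reverse_cons, List.foldl_append, List.foldl_cons,
      List.foldl_nil]
    show (((PySem.List.enumerate xs (s + 1)).reverse.foldl (fun d ip => d.insert ip.2 ip.1) d).insert x s).get? p = _
    by_cases hx : x = p
    · subst hx
      rw [PySem.Dict.get?_insert_self, PySem.List.index?_cons_self]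
      simp
    · rw [PySem.Dict.get?_insert_of_ne _ s (Ne.symm hx), ih (s + 1) d,
        PySem.List.index?_cons_of_ne xs hx]
      rcases h : PySem.List.index? xs p with _ | k
      · simp
      · simp
        omega

lemma pvBuildPos_get? (list1 : List String) (p : String) :
    (pvBuildPos list1).get? p = (PySem.List.index? list1 p).map Int.ofNat := by
  rw [pvBuildPos, pvBuildPos_fold_get? list1 p 0 PySem.Dict.empty]
  rcases PySem.List.index? list1 p with _ | k <;> simp [PySem.Dict.get?_empty]

-- A's running-minimum loop, abstracted to the list of indices it actually compares
def pvMono : List Int → Int → Bool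
  | [], _ => true
  | x :: r, last => if x < last then false else pvMono r x

lemma pvALoop_eq_pvMono (list1 list2 : List String) :
    ∀ (rest : List String), (∀ p ∈ rest, p ∈ list2) → ∀ (last : Int),
      pvALoop list1 (PySem.Set.inter (PySem.Set.ofList list1) (PySem.Set.ofList list2)) rest last
        = pvMono (rest.filterMap (fun p => (PySem.List.index? list1 p).map Int.ofNat)) last := by
  intro rest
  induction rest with
  | nil => intro _ _; rfl
  | cons p rest ih =>
    intro hmem last
    have hp2 : p ∈ list2 := hmem p (List.mem_cons_self)
    have hrest : ∀ q ∈ rest, q ∈ list2 := fun q hq => hmem q (List.mem_cons_of_mem p hq)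
    rw [pvALoop, List.filterMap_cons]
    have hcommon : PySem.Set.contains (PySem.Set.inter (PySem.Set.ofList list1) (PySem.Set.ofList list2)) p = decide (p ∈ list1) := by
      by_cases h1 : p ∈ list1
      · simp only [h1, decide_true]
        exact (PySem.Set.contains_iff _ _).mpr
          ((PySem.Set.mem_inter _ _ _).mpr ⟨(PySem.Set.mem_ofList _ _).mpr h1, (PySem.Set.mem_ofList _ _).mpr hp2⟩)
      · have hni : p ∉ PySem.Set.inter (PySem.Set.ofList list1) (PySem.Set.ofList list2) :=
          fun hm => h1 ((PySem.Set.mem_ofList _ _).mp ((PySem.Set.mem_inter _ _ _).mp hm).1)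
        simp only [h1, decide_false]
        cases hcb : PySem.Set.contains (PySem.Set.inter (PySem.Set.ofList list1) (PySem.Set.ofList list2)) p with
        | false => rfl
        | true => exact absurd ((PySem.Set.contains_iff _ _).mp hcb) hni
    rw [hcommon]
    by_cases h1 : p ∈ list1
    · rcases hk : PySem.List.index? list1 p with _ | k
      · exact absurd h1 ((PySem.List.index?_eq_none_iff _ _).mp hk)
      · simp only [h1, decide_true, if_true, Option.map_some, pvMono]
        by_cases hlt : Int.ofNat k < last
        · rw [if_pos hlt, if_pos hlt]
        · rw [if_neg hlt, if_neg hlt, ih hrest]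
    · have hk : PySem.List.index? list1 p = none := (PySem.List.index?_eq_none_iff _ _).mpr h1
      simp only [h1, decide_false, Bool.false_eq_true, if_false, hk, Option.map_none]
      exact ih hrest last

lemma pvMono_iff_pairwise (xs : List Int) : ∀ last : Int,
    pvMono xs last = true ↔ ((∀ x ∈ xs, last ≤ x) ∧ xs.Pairwise (· ≤ ·)) := by
  induction xs with
  | nil => intro last; simp [pvMono]
  | cons x r ih =>
    intro last
    rw [pvMono]
    by_cases h : x < last
    · simp only [h, if_pos, Bool.false_eq_true, false_iff]
      intro hc
      exact absurd (hc.1 x (List.mem_cons_self)) (by omega)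
    · rw [if_neg h, ih, List.pairwise_cons]
      constructor
      · rintro ⟨hall, hpw⟩
        refine ⟨?_, hall, hpw⟩
        intro y hy
        rcases List.mem_cons.mp hy with rfl | hy
        · omega
        · exact le_trans (by omega : last ≤ x) (hall y hy)
      · rintro ⟨_, hall, hpw⟩
        exact ⟨hall, hpw⟩

lemma pvMono_neg_one_iff_sorted (xs : List Int) (hnn : ∀ x ∈ xs, 0 ≤ x) :
    pvMono xs (-1) = true ↔ xs = PySem.List.sorted xs (fun x => x) false := by
  rw [pvMono_iff_pairwise]
  constructor
  · intro h
    exact (PySem.List.sorted_eq_self_of_pairwise xs (fun x => x) h.2).symm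
  · intro h
    refine ⟨fun y hy => by have := hnn y hy; omega, ?_⟩
    have := PySem.List.sorted_pairwise xs (fun x => x)
    rw [← h] at this
    exact this

-- ===== VERDICT =====
theorem are_common_params_ordered_spec : Claim_equal_are_common_params_ordered := by
  intro list1 list2 _
  unfold Spec_are_common_params_ordered are_common_params_ordered are_common_params_ordered_alt
  rw [pvALoop_eq_pvMono list1 list2 list2 (fun _ h => h) (-1)]
  have hfun : (fun p => (pvBuildPos list1).get? p)
      = (fun p => (PySem.List.index? list1 p).map Int.ofNat) :=
    funext (pvBuildPos_get? list1)
  show pvMono (list2.filterMap (fun p => (PySem.List.index? list1 p).map Int.ofNat)) (-1)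
      = decide (list2.filterMap (fun p => (pvBuildPos list1).get? p)
          = PySem.List.sorted (list2.filterMap (fun p => (pvBuildPos list1).get? p)) (fun x => x) false)
  rw [hfun]
  set xs := list2.filterMap (fun p => (PySem.List.index? list1 p).map Int.ofNat) with hxs
  have hnn : ∀ x ∈ xs, 0 ≤ x := by
    intro x hx
    rcases List.mem_filterMap.mp (hxs ▸ hx) with ⟨p, -, hmap⟩
    rcases hmi : PySem.List.index? list1 p with _ | k <;> rw [hmi] at hmap <;> simp at hmap
    omega
  rcases h : pvMono xs (-1) with _ | _
  · symm; rw [decide_eq_false_iff_not]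
    intro heq
    have := (pvMono_neg_one_iff_sorted xs hnn).mpr heq
    rw [h] at this; exact Bool.false_ne_true this
  · symm; rw [decide_eq_true_iff]
    exact (pvMono_neg_one_iff_sorted xs hnn).mp h
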